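-- pv_equiv track=rewrite | github.com/ptcryptoclub/app.ptcrypto.club | ptCryptoClub/admin/gen_functions.py | hide_ip
-- ===== SOURCE A (Python) =====
-- def hide_ip(ip):
--     hidden_ip = ""
--     length = len(ip) - 4
--     for i, char in enumerate(ip):
--         if i == 0 or i > length:
--             hidden_ip += char
--         else:
--             hidden_ip += "*"
--     return hidden_ip
-- ===== SOURCE B (Python) =====
-- def hide_ip(ip):
--     n = len(ip)
--     if n <= 4:
--         return ip
--     return ip[0] + "*" * (n - 4) + ip[-3:]
-- ===== Notes on version B (the rewrite author's own statement) =====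
-- stated objective: simpler
-- what changed: Replaces the per-character enumerate loop with quadratic string concatenation by a closed-form slice expression: keep the first char, star the middle, keep the last three; strings of length <= 4 are returned unchanged by an explicit guard.
import Mathlib
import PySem

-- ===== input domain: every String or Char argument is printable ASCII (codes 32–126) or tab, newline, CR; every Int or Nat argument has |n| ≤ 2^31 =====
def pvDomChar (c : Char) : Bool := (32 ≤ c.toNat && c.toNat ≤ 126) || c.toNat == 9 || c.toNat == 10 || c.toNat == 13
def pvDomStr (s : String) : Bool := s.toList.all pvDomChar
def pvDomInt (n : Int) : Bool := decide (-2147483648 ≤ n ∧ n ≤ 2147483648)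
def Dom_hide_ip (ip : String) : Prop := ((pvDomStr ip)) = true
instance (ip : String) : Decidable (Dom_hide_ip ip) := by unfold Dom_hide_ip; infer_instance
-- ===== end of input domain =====

-- B replaces A's per-character enumerate loop by a closed-form slice expression
-- (first char + stars + last three, short strings unchanged); objective: simpler.


-- ===== PORT A =====
-- hidden_ip accumulated left to right over enumerate(ip); '+= char/"*"' is the appended singleton.
def hide_ip (ip : String) : String :=
  let l := ip.toList
  let length : Int := (l.length : Int) - 4
  String.ofList ((PySem.List.enumerate l 0).foldl
    (fun acc p => acc ++ [if p.1 == 0 || p.1 > length then p.2 else '*']) [])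

-- ===== PORT B =====
-- ip[0] + "*" * (n - 4) + ip[-3:] after the n ≤ 4 guard (so ip[0] is in range).
def hide_ip_alt (ip : String) : String :=
  let l := ip.toList
  if l.length ≤ 4 then ip
  else
    match PySem.List.pyGet? l 0 with
    | some c => String.ofList ([c] ++ List.replicate (l.length - 4) '*'
        ++ PySem.List.slice l (some (-3)) none)
    | none => ip  -- unreachable: the guard gives 4 < l.length

-- ===== PRECONDITION & SPEC =====
def Spec_hide_ip (ip : String) (out : String) : Prop := out = hide_ip_alt ip
instance (ip : String) (out : String) : Decidable (Spec_hide_ip ip out) := by unfold Spec_hide_ip; infer_instance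

-- ===== CLAIM (what is proved, stated in full; the proofs are below) =====
def Claim_equal_hide_ip : Prop := ∀ (ip : String), Dom_hide_ip ip → Spec_hide_ip ip (hide_ip ip)

-- ===== LEMMAS AND PROOFS =====

-- A's loop over any char list, as a map over the enumeration.
theorem hideA_list (l : List Char) :
    (PySem.List.enumerate l 0).foldl
      (fun acc p => acc ++ [if p.1 == 0 || p.1 > (l.length : Int) - 4 then p.2 else '*']) []
    = (PySem.List.enumerate l 0).map
        (fun p => if p.1 == 0 || p.1 > (l.length : Int) - 4 then p.2 else '*') := by
  exact PySem.List.foldl_append_singleton_eq_map _ _ []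

theorem hide_map_short (l : List Char) (h : l.length ≤ 4) :
    (PySem.List.enumerate l 0).map
      (fun p => if p.1 == 0 || p.1 > (l.length : Int) - 4 then p.2 else '*') = l := by
  apply List.ext_getElem
  · simp [PySem.List.length_enumerate]
  · intro k h1 h2
    simp only [List.getElem_map, PySem.List.getElem_enumerate]
    split
    · rfl
    · next hcond =>
      exfalso
      simp only [Bool.or_eq_true, beq_iff_eq, decide_eq_true_eq, not_or, not_lt] at hcond
      omega

theorem hide_map_long (l : List Char) (h : 4 < l.length) :
    (PySem.List.enumerate l 0).map
      (fun p => if p.1 == 0 || p.1 > (l.length : Int) - 4 then p.2 else '*')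
    = [l[0]'(by omega)] ++ List.replicate (l.length - 4) '*' ++ l.drop (l.length - 3) := by
  apply List.ext_getElem
  · simp [PySem.List.length_enumerate]; omega
  · intro k h1 h2
    have hk : k < l.length := by simpa [PySem.List.length_enumerate] using h1
    simp only [List.getElem_map, PySem.List.getElem_enumerate, List.cons_append,
      List.nil_append]
    cases k with
    | zero => simp
    | succ j =>
      simp only [List.getElem_cons_succ]
      split
      · next hcond =>
        -- kept tail: index j + 1 > l.length - 4
        simp only [Bool.or_eq_true, beq_iff_eq, decide_eq_true_eq] at hcond
        have hj : l.length - 4 ≤ j := by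
          rcases hcond with h0 | hgt
          · omega
          · push_cast at hgt; omega
        rw [List.getElem_append_right (by simp [List.length_replicate]; omega)]
        simp only [List.getElem_drop, List.length_replicate]
        congr 1
        omega
      · next hcond =>
        -- starred middle: index j + 1 ≤ l.length - 4
        simp only [Bool.or_eq_true, beq_iff_eq, decide_eq_true_eq, not_or, not_lt] at hcond
        have hj : j < l.length - 4 := by
          have := hcond.2; push_cast at this; omega
        rw [List.getElem_append_left (by simp [List.length_replicate]; omega)]
        simp

-- ===== VERDICT (by name: the statement is the Claim_ definition above) =====
theorem hide_ip_spec : Claim_equal_hide_ip := by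
  intro ip _
  unfold Spec_hide_ip hide_ip hide_ip_alt
  simp only []
  rw [hideA_list]
  by_cases h : ip.toList.length ≤ 4
  · rw [hide_map_short ip.toList h, if_pos h, String.ofList_toList]
  · push Not at h
    rw [hide_map_long ip.toList h, if_neg (by omega)]
    have h0 : PySem.List.pyGet? ip.toList 0 = some (ip.toList[0]'(by omega)) := by
      rw [PySem.List.pyGet?_zero]
      simp [List.getElem?_eq_getElem (by omega : 0 < ip.toList.length)]
    rw [h0]
    rw [PySem.List.slice_from_neg_ofNat ip.toList 3 (by omega)]
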